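-- pv_equiv track=rewrite | github.com/primordial-creations/asguardian | Asgard/Freya/Visual/services/image_ops.py | component_bounding_boxes
-- ===== SOURCE A (Python) =====
-- from typing import Dict, List, Optional, Tuple
--
-- def component_bounding_boxes(
--     labels: List[int], width: int, height: int, num_labels: int
-- ) -> Dict[int, Tuple[int, int, int, int, int]]:
--     """
--     For each component label, return (x_min, y_min, x_max, y_max, pixel_count).
--     """
--     boxes: Dict[int, List[int]] = {}
--     for y in range(height):
--         for x in range(width):
--             label = labels[y * width + x]
--             if label == 0:
--                 continue
--             if label not in boxes:
--                 boxes[label] = [x, y, x, y, 0]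
--             box = boxes[label]
--             if x < box[0]:
--                 box[0] = x
--             if y < box[1]:
--                 box[1] = y
--             if x > box[2]:
--                 box[2] = x
--             if y > box[3]:
--                 box[3] = y
--             box[4] += 1
--
--     return {k: (v[0], v[1], v[2], v[3], v[4]) for k, v in boxes.items()}
-- ===== SOURCE B (Python) =====
-- def component_bounding_boxes(labels, width, height, num_labels):
--     # Two-pass: first collect every pixel coordinate per label (first-encounter
--     # key order), then aggregate each coordinate list into a bounding box.
--     coords = {}
--     for y in range(height):
--         for x in range(width):
--             label = labels[y * width + x]
--             if label == 0:
--                 continue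
--             coords.setdefault(label, []).append((x, y))
--     out = {}
--     for k, cs in coords.items():
--         xs = [c[0] for c in cs]
--         ys = [c[1] for c in cs]
--         out[k] = (min(xs), min(ys), max(xs), max(ys), len(cs))
--     return out
-- ===== Notes on version B (the rewrite author's own statement) =====
-- stated objective: alternative
-- what changed: B splits the work into two passes: the pixel scan only groups coordinates per label into lists (setdefault/append), and a separate pass aggregates each list with min/max/len, instead of A's single scan that mutates a running 5-element box per label.
import Mathlib
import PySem

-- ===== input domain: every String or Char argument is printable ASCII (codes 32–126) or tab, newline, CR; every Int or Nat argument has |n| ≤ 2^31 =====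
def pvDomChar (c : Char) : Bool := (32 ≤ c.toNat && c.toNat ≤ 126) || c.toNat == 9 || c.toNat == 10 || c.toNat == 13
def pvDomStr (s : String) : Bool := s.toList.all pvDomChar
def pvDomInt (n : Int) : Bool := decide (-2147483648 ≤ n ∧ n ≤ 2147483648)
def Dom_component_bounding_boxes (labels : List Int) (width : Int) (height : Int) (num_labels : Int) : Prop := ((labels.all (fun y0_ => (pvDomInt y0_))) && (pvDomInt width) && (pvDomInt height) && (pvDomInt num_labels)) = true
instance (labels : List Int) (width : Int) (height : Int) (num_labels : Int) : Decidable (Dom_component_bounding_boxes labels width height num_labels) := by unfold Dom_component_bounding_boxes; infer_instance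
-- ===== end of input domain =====

-- B groups pixel coordinates per label in one scan and aggregates each list with min/max/len in a
-- second pass, instead of A's single scan mutating a running box; same return value, no mutation.

-- ===== PORT A =====
-- loop body of A's inner `for x in range(width)` (labels[y*width+x] is in range under Pre_, so pyGetD's default is never used)
def cbbStepA (labels : List Int) (width y : Int)
    (d : PySem.Dict Int (Int × Int × Int × Int × Int)) (x : Int) :
    PySem.Dict Int (Int × Int × Int × Int × Int) :=
  let label := PySem.List.pyGetD labels (y * width + x) 0
  if label = 0 then d
  else
    let d := if d.contains label then d else d.insert label (x, y, x, y, 0)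
    let b := d.getD label (0, 0, 0, 0, 0)
    let b0 := if x < b.1 then x else b.1
    let b1 := if y < b.2.1 then y else b.2.1
    let b2 := if b.2.2.1 < x then x else b.2.2.1
    let b3 := if b.2.2.2.1 < y then y else b.2.2.2.1
    d.insert label (b0, b1, b2, b3, b.2.2.2.2 + 1)

def component_bounding_boxes (labels : List Int) (width : Int) (height : Int) (num_labels : Int) : List (Int × Int × Int × Int × Int × Int) :=
  -- boxes, then the final comprehension {k: (v[0],...,v[4]) for k, v in boxes.items()}
  ((PySem.List.pyRange 0 height 1).foldl
    (fun d y => (PySem.List.pyRange 0 width 1).foldl (cbbStepA labels width y) d)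
    PySem.Dict.empty).items.map (fun p => (p.1, p.2.1, p.2.2.1, p.2.2.2.1, p.2.2.2.2))

-- ===== PORT B =====
-- loop body of B's inner `for x in range(width)` (setdefault+append = modify with default [])
def cbbStepB (labels : List Int) (width y : Int)
    (d : PySem.Dict Int (List (Int × Int))) (x : Int) :
    PySem.Dict Int (List (Int × Int)) :=
  let label := PySem.List.pyGetD labels (y * width + x) 0
  if label = 0 then d
  else d.modify label [] (· ++ [(x, y)])

-- B's second pass on one coordinate list: (min(xs), min(ys), max(xs), max(ys), len(cs)).
-- The .getD 0 default is never used: every stored list is nonempty (Python min/max never see []).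
def cbbAgg (cs : List (Int × Int)) : Int × Int × Int × Int × Int :=
  ((PySem.List.min? (cs.map (·.1)) (fun v => v)).getD 0,
   (PySem.List.min? (cs.map (·.2)) (fun v => v)).getD 0,
   (PySem.List.max? (cs.map (·.1)) (fun v => v)).getD 0,
   (PySem.List.max? (cs.map (·.2)) (fun v => v)).getD 0,
   (cs.length : Int))

def component_bounding_boxes_alt (labels : List Int) (width : Int) (height : Int) (num_labels : Int) : List (Int × Int × Int × Int × Int × Int) :=
  ((PySem.List.pyRange 0 height 1).foldl
    (fun d y => (PySem.List.pyRange 0 width 1).foldl (cbbStepB labels width y) d)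
    PySem.Dict.empty).items.map (fun p => (p.1, cbbAgg p.2))

-- ===== PRECONDITION & SPEC =====
-- Pre_ excludes exactly the inputs where A raises IndexError: a positive grid whose
-- labels list is shorter than width*height.
def Pre_component_bounding_boxes (labels : List Int) (width : Int) (height : Int) (num_labels : Int) : Prop :=
  (decide (width ≤ 0) || decide (height ≤ 0) || decide (height * width ≤ (labels.length : Int))) = true
instance (labels : List Int) (width : Int) (height : Int) (num_labels : Int) : Decidable (Pre_component_bounding_boxes labels width height num_labels) := by unfold Pre_component_bounding_boxes; infer_instance

def pvWitness_component_bounding_boxes : List Int × Int × Int × Int := ([1, 0, 2, 1], 2, 2, 3)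

def Spec_component_bounding_boxes (labels : List Int) (width : Int) (height : Int) (num_labels : Int) (out : List (Int × Int × Int × Int × Int × Int)) : Prop := out = component_bounding_boxes_alt labels width height num_labels
instance (labels : List Int) (width : Int) (height : Int) (num_labels : Int) (out : List (Int × Int × Int × Int × Int × Int)) : Decidable (Spec_component_bounding_boxes labels width height num_labels out) := by unfold Spec_component_bounding_boxes; infer_instance

-- ===== CLAIM (what is proved, stated in full; the proofs are below) =====
def Claim_equal_component_bounding_boxes : Prop := ∀ (labels : List Int) (width : Int) (height : Int) (num_labels : Int), Dom_component_bounding_boxes labels width height num_labels → Pre_component_bounding_boxes labels width height num_labels → Spec_component_bounding_boxes labels width height num_labels (component_bounding_boxes labels width height num_labels)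

-- ===== LEMMAS AND PROOFS =====

-- the simulation invariant: A's dict is B's dict with every coordinate list aggregated,
-- and every stored coordinate list is nonempty
def cbbInv (dA : PySem.Dict Int (Int × Int × Int × Int × Int))
    (dB : PySem.Dict Int (List (Int × Int))) : Prop :=
  dA.items = dB.items.map (fun p => (p.1, cbbAgg p.2)) ∧ ∀ p ∈ dB.items, p.2 ≠ []

lemma cbbAgg_singleton (x y : Int) : cbbAgg [(x, y)] = (x, y, x, y, 1) := rfl

lemma cbbAgg_snoc (cs : List (Int × Int)) (hcs : cs ≠ []) (x y : Int) :
    cbbAgg (cs ++ [(x, y)]) =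
      (if x < (cbbAgg cs).1 then x else (cbbAgg cs).1,
       if y < (cbbAgg cs).2.1 then y else (cbbAgg cs).2.1,
       if (cbbAgg cs).2.2.1 < x then x else (cbbAgg cs).2.2.1,
       if (cbbAgg cs).2.2.2.1 < y then y else (cbbAgg cs).2.2.2.1,
       (cbbAgg cs).2.2.2.2 + 1) := by
  obtain ⟨c, t, rfl⟩ := List.exists_cons_of_ne_nil hcs
  simp only [cbbAgg, List.cons_append, List.map_cons, List.map_append, List.map_cons,
    List.map_nil, PySem.List.min?_id_cons, PySem.List.max?_id_cons, Option.getD_some,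
    List.foldl_append, List.foldl_cons, List.foldl_nil, List.length_append, List.length_cons,
    List.length_nil]
  refine Prod.ext ?_ (Prod.ext ?_ (Prod.ext ?_ (Prod.ext ?_ ?_))) <;>
    simp [min_def, max_def] <;> omega

lemma cbb_contains_eq (dA : PySem.Dict Int (Int × Int × Int × Int × Int))
    (dB : PySem.Dict Int (List (Int × Int)))
    (h : dA.items = dB.items.map (fun p => (p.1, cbbAgg p.2))) (k : Int) :
    dA.contains k = dB.contains k := by
  simp only [PySem.Dict.contains, h, List.any_map, Function.comp_def]

lemma cbb_get?_eq (dA : PySem.Dict Int (Int × Int × Int × Int × Int))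
    (dB : PySem.Dict Int (List (Int × Int)))
    (h : dA.items = dB.items.map (fun p => (p.1, cbbAgg p.2))) (k : Int) :
    dA.get? k = (dB.get? k).map cbbAgg := by
  simp only [PySem.Dict.get?, h, List.find?_map, Function.comp_def]
  cases hf : List.find? (fun p => p.1 == k) dB.items <;> simp [hf]

lemma cbbStep_inv (labels : List Int) (width y x : Int)
    (dA : PySem.Dict Int (Int × Int × Int × Int × Int))
    (dB : PySem.Dict Int (List (Int × Int))) (h : cbbInv dA dB) :
    cbbInv (cbbStepA labels width y dA x) (cbbStepB labels width y dB x) := by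
  obtain ⟨hi, hne⟩ := h
  unfold cbbStepA cbbStepB
  set L := PySem.List.pyGetD labels (y * width + x) 0 with hL
  by_cases h0 : L = 0
  · simp [h0]; exact ⟨hi, hne⟩
  simp only [h0, if_false]
  by_cases hc : dB.contains L = true
  · -- key already present: both sides replace the entry in place
    have hcA : dA.contains L = true := (cbb_contains_eq dA dB hi L).trans hc
    obtain ⟨cs, hget⟩ : ∃ cs, dB.get? L = some cs := by
      rcases hg : dB.get? L with _ | cs
      · exfalso
        have := PySem.Dict.contains_eq_isSome_get? (d := dB) (k := L)
        rw [hg] at this; simp [this] at hc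
      · exact ⟨cs, rfl⟩
    have hcsne : cs ≠ [] := by
      have hmem : (L, cs) ∈ dB.items := PySem.Dict.mem_items_of_get?_eq_some _ hget
      exact hne _ hmem
    have hgetA : dA.getD L (0, 0, 0, 0, 0) = cbbAgg cs := by
      simp [PySem.Dict.getD, cbb_get?_eq dA dB hi L, hget]
    have hgetB : dB.getD L [] = cs := by simp [PySem.Dict.getD, hget]
    simp only [hcA, if_true, PySem.Dict.modify, hgetB, hgetA]
    constructor
    · rw [PySem.Dict.items_insert_of_contains _ _ hcA,
        PySem.Dict.items_insert_of_contains _ _ hc, hi, List.map_map, List.map_map]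
      apply List.map_congr_left
      intro p _
      by_cases hk : p.1 == L <;>
        simp [Function.comp, hk, cbbAgg_snoc cs hcsne x y]
    · intro p hp
      rw [PySem.Dict.items_insert_of_contains _ _ hc] at hp
      obtain ⟨q, hq, rfl⟩ := List.mem_map.mp hp
      by_cases hk : q.1 == L <;> simp [hk]
      · exact hne _ hq
  · -- new key: both sides append it
    have hcA : dA.contains L = false := by
      rw [cbb_contains_eq dA dB hi L]; simpa using hc
    have hcB : dB.contains L = false := by simpa using hc
    have hkey : ∀ p ∈ dA.items, (p.1 == L) = false := by
      intro p hp
      by_contra hpk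
      have h1 : dA.contains L = true := by
        simp only [PySem.Dict.contains, List.any_eq_true]
        exact ⟨p, hp, by simpa using hpk⟩
      rw [hcA] at h1; cases h1
    have hif : (if dA.contains L = true then dA else dA.insert L (x, y, x, y, 0))
        = dA.insert L (x, y, x, y, 0) := by rw [hcA]; simp
    have hgetA :
        (dA.insert L (x, y, x, y, 0)).getD L (0, 0, 0, 0, 0) = (x, y, x, y, (0 : Int)) := by
      simp [PySem.Dict.getD, PySem.Dict.get?_insert_self]
    have hgetB : dB.getD L [] = [] := PySem.Dict.getD_of_not_contains _ _ hcB
    have hcA2 : (dA.insert L (x, y, x, y, 0)).contains L = true :=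
      PySem.Dict.contains_insert_self _ _ _
    simp only [PySem.Dict.modify, hgetB, List.nil_append]
    rw [hif, hgetA]
    have hvx : (if x < (x, y, x, y, (0 : Int)).1 then x else (x, y, x, y, (0 : Int)).1) = x := by
      simp
    have hvy : (if y < (x, y, x, y, (0 : Int)).2.1 then y else (x, y, x, y, (0 : Int)).2.1) = y := by
      simp
    have hvn : (x, y, x, y, (0 : Int)).2.2.2.2 + 1 = (1 : Int) := by simp
    -- hvx / hvy match (up to reduction) both the min- and the max-update of the fresh box
    rw [hvx, hvy, hvn]
    have hAitems := PySem.Dict.items_insert_of_not_contains dA (v := (x, y, x, y, (0 : Int))) hcA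
    have hBitems := PySem.Dict.items_insert_of_not_contains dB (v := [(x, y)]) hcB
    constructor
    · rw [PySem.Dict.items_insert_of_contains _ _ hcA2, hAitems, hBitems,
        List.map_append, List.map_append]
      have hid : dA.items.map
          (fun p => if p.1 == L then (L, (x, y, x, y, (1 : Int))) else p) = dA.items := by
        calc dA.items.map (fun p => if p.1 == L then (L, (x, y, x, y, (1 : Int))) else p)
              = dA.items.map id := by
              apply List.map_congr_left; intro p hp; simp [hkey p hp]
          _ = dA.items := List.map_id _
      rw [hid, hi]
      simp [cbbAgg_singleton]
    · intro p hp
      rw [hBitems] at hp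
      rcases List.mem_append.mp hp with hp | hp
      · exact hne _ hp
      · simp only [List.mem_singleton] at hp; subst hp; simp

lemma cbb_foldl_inner_inv (labels : List Int) (width y : Int) (xs : List Int)
    (dA : PySem.Dict Int (Int × Int × Int × Int × Int))
    (dB : PySem.Dict Int (List (Int × Int))) (h : cbbInv dA dB) :
    cbbInv (xs.foldl (cbbStepA labels width y) dA) (xs.foldl (cbbStepB labels width y) dB) := by
  induction xs generalizing dA dB with
  | nil => exact h
  | cons x t ih => exact ih _ _ (cbbStep_inv labels width y x dA dB h)

lemma cbb_foldl_outer_inv (labels : List Int) (width : Int) (ys : List Int)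
    (dA : PySem.Dict Int (Int × Int × Int × Int × Int))
    (dB : PySem.Dict Int (List (Int × Int))) (h : cbbInv dA dB) :
    cbbInv (ys.foldl (fun d y => (PySem.List.pyRange 0 width 1).foldl (cbbStepA labels width y) d) dA)
      (ys.foldl (fun d y => (PySem.List.pyRange 0 width 1).foldl (cbbStepB labels width y) d) dB) := by
  induction ys generalizing dA dB with
  | nil => exact h
  | cons y t ih => exact ih _ _ (cbb_foldl_inner_inv labels width y _ dA dB h)

-- ===== VERDICT (by name: the statement is the Claim_ definition above) =====
theorem component_bounding_boxes_spec : Claim_equal_component_bounding_boxes := by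
  intro labels width height num_labels _ _
  unfold Spec_component_bounding_boxes component_bounding_boxes component_bounding_boxes_alt
  have h0 : cbbInv PySem.Dict.empty PySem.Dict.empty := by
    constructor <;> simp [PySem.Dict.empty]
  have hinv := cbb_foldl_outer_inv labels width (PySem.List.pyRange 0 height 1)
    PySem.Dict.empty PySem.Dict.empty h0
  rw [hinv.1, List.map_map]
  apply List.map_congr_left
  intro p _
  simp [Function.comp]
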